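-- pv_equiv track=rewrite | github.com/A-7-med/Grundlagen-der-KI---Team-Abgabe | Praktikum 2/EA_02_ Implementierung_Python_code/test.py | map_conflicts
-- ===== SOURCE A (Python) =====
-- NEIGHBORS = {
--     'A': ['B', 'C'],
--     'B': ['A', 'C', 'D'],
--     'C': ['A', 'B', 'D', 'E'],
--     'D': ['B', 'C', 'E', 'F'],
--     'E': ['C', 'D', 'F'],
--     'F': ['D', 'E']
-- }
--
-- REGIONS = list(NEIGHBORS.keys())
--
-- def map_conflicts(coloring):
--     """Zählt, wie viele Nachbarn die gleiche Farbe haben."""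
--     color_of = {REGIONS[i]: coloring[i] for i in range(len(REGIONS))}
--     conflicts = 0
--     for r in REGIONS:
--         for n in NEIGHBORS[r]:
--             if r < n and color_of[r] == color_of[n]:  # vermeidet Doppelzählung
--                 conflicts += 1
--     return conflicts
-- ===== SOURCE B (Python) =====
-- # The unique undirected edges of the fixed map, as index pairs into REGIONS = A..F.
-- EDGES = [(0, 1), (0, 2), (1, 2), (1, 3), (2, 3), (2, 4), (3, 4), (3, 5), (4, 5)]
--
-- def map_conflicts(coloring):
--     """Zählt, wie viele Nachbarn die gleiche Farbe haben."""
--     return sum(1 for i, j in EDGES if coloring[i] == coloring[j])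
-- ===== Notes on version B (the rewrite author's own statement) =====
-- stated objective: simpler
-- what changed: Precomputes the fixed graph's unique undirected edges as index pairs once and counts equal-colored endpoints in one flat pass, removing the dict build, the nested adjacency scan and the r<n dedup filter.
import Mathlib
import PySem

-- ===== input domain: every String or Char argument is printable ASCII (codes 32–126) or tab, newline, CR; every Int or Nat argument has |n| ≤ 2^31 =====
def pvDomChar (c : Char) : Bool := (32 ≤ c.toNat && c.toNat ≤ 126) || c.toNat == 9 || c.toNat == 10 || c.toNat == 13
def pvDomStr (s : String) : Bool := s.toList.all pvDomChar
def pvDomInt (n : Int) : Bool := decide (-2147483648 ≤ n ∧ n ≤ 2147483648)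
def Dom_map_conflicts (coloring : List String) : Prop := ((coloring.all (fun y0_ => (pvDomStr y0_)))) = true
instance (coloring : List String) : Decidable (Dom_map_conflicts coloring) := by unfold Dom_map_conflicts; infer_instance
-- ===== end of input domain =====

-- B counts equal-colored endpoints in one flat pass over a precomputed edge list instead of A's dict build + nested adjacency scan with an r<n dedup filter (objective: simpler).


-- ===== PORT A =====
def pvNeighborsA : PySem.Dict String (List String) :=
  PySem.Dict.ofList [("A", ["B", "C"]), ("B", ["A", "C", "D"]), ("C", ["A", "B", "D", "E"]),
   ("D", ["B", "C", "E", "F"]), ("E", ["C", "D", "F"]), ("F", ["D", "E"])]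

def pvRegionsA : List String := ["A", "B", "C", "D", "E", "F"]

def map_conflicts (coloring : List String) : Int :=
  -- color_of = {REGIONS[i]: coloring[i] for i in range(len(REGIONS))}; indexing is valid under Pre_ (length ≥ 6)
  let color_of : PySem.Dict String String :=
    (PySem.List.pyRange 0 (Int.ofNat pvRegionsA.length) 1).foldl
      (fun d i => d.insert ((PySem.List.pyGet? pvRegionsA i).getD "")
                           ((PySem.List.pyGet? coloring i).getD "")) PySem.Dict.empty
  pvRegionsA.foldl (fun conflicts r =>
    (pvNeighborsA.getD r []).foldl (fun c n =>
      if r < n ∧ color_of.getD r "" = color_of.getD n "" then c + 1 else c) conflicts) 0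

-- ===== PORT B =====
def pvEdgesB : List (Int × Int) :=
  [(0, 1), (0, 2), (1, 2), (1, 3), (2, 3), (2, 4), (3, 4), (3, 5), (4, 5)]

def map_conflicts_alt (coloring : List String) : Int :=
  -- sum(1 for i, j in EDGES if coloring[i] == coloring[j]); indexing valid under Pre_
  pvEdgesB.foldl (fun c p =>
    if (PySem.List.pyGet? coloring p.1).getD "" = (PySem.List.pyGet? coloring p.2).getD ""
    then c + 1 else c) 0

-- ===== PRECONDITION & SPEC =====
-- A indexes coloring[0..5]; on shorter lists it raises IndexError (so does B).
def Pre_map_conflicts (coloring : List String) : Prop := 6 ≤ coloring.length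
instance (coloring : List String) : Decidable (Pre_map_conflicts coloring) := by
  unfold Pre_map_conflicts; infer_instance

def pvWitness_map_conflicts : List String := ["r", "g", "b", "r", "g", "b"]

def Spec_map_conflicts (coloring : List String) (out : Int) : Prop := out = map_conflicts_alt coloring
instance (coloring : List String) (out : Int) : Decidable (Spec_map_conflicts coloring out) := by unfold Spec_map_conflicts; infer_instance

-- ===== CLAIM (what is proved, stated in full; the proofs are below) =====
def Claim_equal_map_conflicts : Prop := ∀ (coloring : List String), Dom_map_conflicts coloring → Pre_map_conflicts coloring → Spec_map_conflicts coloring (map_conflicts coloring)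

-- ===== LEMMAS AND PROOFS =====

-- ===== VERDICT (by name: the statement is the Claim_ definition above) =====
theorem map_conflicts_spec : Claim_equal_map_conflicts := by
  intro coloring _ hpre
  unfold Pre_map_conflicts at hpre
  obtain ⟨a, b, c, d, e, f, rest, rfl⟩ :
      ∃ a b c d e f rest, coloring = a :: b :: c :: d :: e :: f :: rest := by
    match coloring, hpre with
    | a :: b :: c :: d :: e :: f :: rest, _ => exact ⟨a, b, c, d, e, f, rest, rfl⟩
  unfold Spec_map_conflicts map_conflicts map_conflicts_alt pvRegionsA pvNeighborsA pvEdgesB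
  simp [PySem.List.pyRange, PySem.List.pyGet?, PySem.List.pyIdx?, PySem.Dict.insert, PySem.Dict.ofList, PySem.Dict.update, PySem.Dict.empty, PySem.Dict.contains,
        PySem.Dict.getD, PySem.Dict.get?, List.foldl_cons, List.foldl_nil, List.find?, List.range_succ, List.map,
        show ([ 'E' ] < [ 'F' ]) from by decide,
        show ([ 'D' ] < [ 'F' ]) from by decide,
        show ([ 'D' ] < [ 'E' ]) from by decide,
        show ([ 'C' ] < [ 'E' ]) from by decide,
        show ([ 'C' ] < [ 'D' ]) from by decide,
        show ([ 'B' ] < [ 'D' ]) from by decide,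
        show ([ 'B' ] < [ 'C' ]) from by decide,
        show ([ 'A' ] < [ 'C' ]) from by decide,
        show ([ 'A' ] < [ 'B' ]) from by decide,
        show ¬([ 'F' ] < [ 'E' ]) from by decide,
        show ¬([ 'F' ] < [ 'D' ]) from by decide,
        show ¬([ 'E' ] < [ 'D' ]) from by decide,
        show ¬([ 'E' ] < [ 'C' ]) from by decide,
        show ¬([ 'D' ] < [ 'C' ]) from by decide,
        show ¬([ 'D' ] < [ 'B' ]) from by decide,
        show ¬([ 'C' ] < [ 'B' ]) from by decide,
        show ¬([ 'C' ] < [ 'A' ]) from by decide,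
        show ¬([ 'B' ] < [ 'A' ]) from by decide,
        show ((0:Int) ≤ (rest.length:Int) + 1 + 1 + 1 + 1 + 1) from by omega,
        show ((1:Int) ≤ (rest.length:Int) + 1 + 1 + 1 + 1 + 1) from by omega,
        show ((2:Int) ≤ (rest.length:Int) + 1 + 1 + 1 + 1 + 1) from by omega,
        show ((3:Int) ≤ (rest.length:Int) + 1 + 1 + 1 + 1 + 1) from by omega,
        show ((4:Int) ≤ (rest.length:Int) + 1 + 1 + 1 + 1 + 1) from by omega,
        show ((5:Int) ≤ (rest.length:Int) + 1 + 1 + 1 + 1 + 1) from by omega]
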